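-- pv_equiv track=rewrite | github.com/itamar-menuhin/STABLES_code | feature_repo_yeast_lean/Code/calc_features_chimera.py | score_current_sequence
-- ===== SOURCE A (Python) =====
-- from bisect import bisect_left
--
-- def score_current_sequence(sequence, suffix_list):
--     """
--     Calculate the length of the longest common prefix between a sequence
--     and any sequence in the suffix list.
--
--     This function uses binary search to efficiently find matches in the suffix array.
--
--     Parameters
--     ----------
--     sequence : str
--         The sequence to score
--     suffix_list : list
--         List of suffixes from the suffix array
--
--     Returns
--     -------
--     int
--         The score for the sequence (length of longest common prefix)
--     """
--     score = 0
--     for i in range(len(sequence)):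
--         prefix = sequence[:i + 1]
--         pos = bisect_left(suffix_list, prefix)
--         if pos < len(suffix_list) and suffix_list[pos].startswith(prefix):
--             score += 1
--         else:
--             break
--     return score
-- ===== SOURCE B (Python) =====
-- def score_current_sequence(sequence, suffix_list):
--     """Batched binary search: all prefix-length queries descend the bisect tree
--     together in one traversal, splitting the query interval at each node by an
--     lcp-based threshold, instead of running one bisect per prefix length."""
--     L = len(sequence)
--     n = len(suffix_list)
--     pos = [0] * L
--
--     def lcp(s):
--         m = min(len(s), L)
--         c = 0
--         while c < m and s[c] == sequence[c]:
--             c += 1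
--         return c
--
--     # queries are prefix lengths l in [ql, qr); shared search interval [lo, hi)
--     stack = [(1, L + 1, 0, n)]
--     while stack:
--         ql, qr, lo, hi = stack.pop()
--         if ql >= qr:
--             continue
--         if lo >= hi:
--             for l in range(ql, qr):
--                 pos[l - 1] = lo
--             continue
--         mid = (lo + hi) // 2
--         s = suffix_list[mid]
--         c = lcp(s)
--         # least prefix length t with s < sequence[:t] (clipped into [ql, qr])
--         if c < len(s) and (c == L or s[c] > sequence[c]):
--             t = qr                       # s >= every prefix of sequence
--         else:
--             t = min(qr, max(ql, c + 1))
--         stack.append((ql, t, lo, mid))   # prefixes shorter than t go left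
--         stack.append((t, qr, mid + 1, hi))  # the rest go right
--
--     score = 0
--     for l in range(1, L + 1):
--         p = pos[l - 1]
--         if p < n and l <= lcp(suffix_list[p]):
--             score += 1
--         else:
--             break
--     return score
-- ===== Notes on version B (the rewrite author's own statement) =====
-- stated objective: alternative
-- what changed: Instead of running one independent bisect_left per prefix length, B computes all prefix positions in a single batched descent of the binary-search tree, splitting the interval of prefix-length queries at each node by an lcp-derived threshold, then counts the leading matches in one scan.
import Mathlib
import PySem

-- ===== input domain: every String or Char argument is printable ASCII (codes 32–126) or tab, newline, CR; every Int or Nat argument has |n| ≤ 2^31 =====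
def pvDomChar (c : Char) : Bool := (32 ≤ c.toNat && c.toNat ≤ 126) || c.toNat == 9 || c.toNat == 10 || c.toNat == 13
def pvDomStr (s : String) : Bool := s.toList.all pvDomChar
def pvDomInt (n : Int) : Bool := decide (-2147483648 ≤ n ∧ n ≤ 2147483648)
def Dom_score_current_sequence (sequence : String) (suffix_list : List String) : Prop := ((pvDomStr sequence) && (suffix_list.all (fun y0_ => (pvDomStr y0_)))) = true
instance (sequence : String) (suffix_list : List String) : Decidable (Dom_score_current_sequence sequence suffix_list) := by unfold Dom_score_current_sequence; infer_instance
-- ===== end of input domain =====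

-- B replaces A's one-bisect-per-prefix loop by a single batched descent of the bisect tree
-- (all prefix-length queries walk the tree together, split at each node by an lcp threshold):
-- an alternative algorithm, proved to return exactly A's value on every input.

-- ===== PORT A =====
-- the for-loop of A: i over range(len(sequence)), accumulator `score`, `break` = return score
def pvLoopA (sequence : String) (suffix_list : List String) (i : Nat) (score : Int) : Int :=
  if _h : i < sequence.toList.length then
    -- prefix = sequence[:i + 1]
    let pre := PySem.Str.slice sequence none (some ((i : Int) + 1))
    -- pos = bisect_left(suffix_list, prefix)
    let pos := PySem.List.bisectLeft suffix_list pre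
    -- if pos < len(suffix_list) and suffix_list[pos].startswith(prefix): score += 1 else: break
    if pos < suffix_list.length ∧ PySem.Str.startswith (suffix_list.getD pos "") pre = true then
      pvLoopA sequence suffix_list (i + 1) (score + 1)
    else score
  else score
termination_by sequence.toList.length - i
decreasing_by simp only [String.length_toList] at *; omega

def score_current_sequence (sequence : String) (suffix_list : List String) : Int :=
  pvLoopA sequence suffix_list 0 0

-- ===== PORT B =====
-- length of the common prefix of s and the (whole) sequence  (Source B's `lcp`)
def pvLcp : List Char → List Char → Nat
  | a :: s, b :: q => if a = b then pvLcp s q + 1 else 0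
  | _, _ => 0

-- batched descent (Source B's stack loop, as the equivalent recursion): queries are the prefix
-- lengths l in [ql, qr), all of whose individual binary searches have reached [lo, hi);
-- returns their final positions in order of l.  `s[c] > sequence[c]` is the Char comparison
-- `seq.getD c default < s.getD c default` (both indices are in range when it is evaluated).
def pvSolveB (a : List String) (seq : List Char) (ql qr lo hi : Nat) : List Nat :=
  if ql ≥ qr then []
  else if lo ≥ hi then List.replicate (qr - ql) lo
  else
    let mid := (lo + hi) / 2
    let s := (a.getD mid "").toList
    let c := pvLcp s seq
    let t := if c < s.length ∧ (c = seq.length ∨ seq.getD c default < s.getD c default)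
             then qr else min qr (max ql (c + 1))
    pvSolveB a seq ql t lo mid ++ pvSolveB a seq t qr (mid + 1) hi
termination_by hi - lo
decreasing_by all_goals simp_all; omega

-- Source B's final loop: count leading prefix lengths whose position holds a matching suffix
def pvScanB (a : List String) (seq : List Char) (n : Nat) : List Nat → Nat → Int
  | [], _ => 0
  | p :: rest, l =>
    if p < n ∧ l ≤ pvLcp (a.getD p "").toList seq then 1 + pvScanB a seq n rest (l + 1) else 0

def score_current_sequence_alt (sequence : String) (suffix_list : List String) : Int :=
  let seq := sequence.toList
  let n := suffix_list.length
  pvScanB suffix_list seq n (pvSolveB suffix_list seq 1 (seq.length + 1) 0 n) 1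

-- ===== PRECONDITION & SPEC =====
def Spec_score_current_sequence (sequence : String) (suffix_list : List String) (out : Int) : Prop := out = score_current_sequence_alt sequence suffix_list
instance (sequence : String) (suffix_list : List String) (out : Int) : Decidable (Spec_score_current_sequence sequence suffix_list out) := by unfold Spec_score_current_sequence; infer_instance

-- ===== CLAIM (what is proved, stated in full; the proofs are below) =====
def Claim_equal_score_current_sequence : Prop := ∀ (sequence : String) (suffix_list : List String), Dom_score_current_sequence sequence suffix_list → Spec_score_current_sequence sequence suffix_list (score_current_sequence sequence suffix_list)

-- ===== LEMMAS AND PROOFS =====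

-- proof-side clean form of bisect_left's binary search (no fuel)
def pvBisect (a : List String) (x : String) (lo hi : Nat) : Nat :=
  if _h : lo < hi then
    let mid := (lo + hi) / 2
    if a.getD mid "" < x then pvBisect a x (mid + 1) hi else pvBisect a x lo mid
  else lo
termination_by hi - lo
decreasing_by all_goals omega

theorem pvBisectLoop_eq (a : List String) (x : String) :
    ∀ (fuel lo hi : Nat), hi ≤ a.length → hi - lo ≤ fuel →
      PySem.List.bisectLeftLoop a x fuel lo hi = pvBisect a x lo hi := by
  intro fuel
  induction fuel with
  | zero =>
    intro lo hi _ h2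
    rw [pvBisect]
    simp only [PySem.List.bisectLeftLoop]
    have : ¬ lo < hi := by omega
    simp [this]
  | succ f ih =>
    intro lo hi h1 h2
    rw [pvBisect]
    simp only [PySem.List.bisectLeftLoop]
    by_cases h : lo < hi
    · have hm : (lo + hi) / 2 < a.length := by omega
      simp only [h, if_pos, dif_pos]
      rw [List.getElem?_eq_getElem hm]
      simp only [List.getD_eq_getElem?_getD, List.getElem?_eq_getElem hm, Option.getD_some]
      by_cases hc : a[(lo + hi) / 2] < x
      · simp [hc]; exact ih _ _ h1 (by omega)
      · simp [hc]; exact ih _ _ (by omega) (by omega)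
    · simp [h]

theorem pvBisectLeft_eq (a : List String) (x : String) :
    PySem.List.bisectLeft a x = pvBisect a x 0 a.length :=
  pvBisectLoop_eq a x a.length 0 a.length (le_refl _) (by omega)

theorem pvBisect_stop (a : List String) (x : String) (lo hi : Nat) (h : ¬ lo < hi) :
    pvBisect a x lo hi = lo := by rw [pvBisect]; simp [h]

theorem pvBisect_step (a : List String) (x : String) (lo hi : Nat) (h : lo < hi) :
    pvBisect a x lo hi =
      if a.getD ((lo + hi) / 2) "" < x then pvBisect a x ((lo + hi) / 2 + 1) hi
      else pvBisect a x lo ((lo + hi) / 2) := by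
  rw [pvBisect]; simp [h]

-- threshold characterisation: for l ≤ |seq|, s < seq[:l] iff l passes the lcp threshold
theorem pvLt_take_iff (s seq : List Char) (l : Nat) (hl : l ≤ seq.length) :
    s < seq.take l ↔
      (¬ (pvLcp s seq < s.length ∧
            (pvLcp s seq = seq.length ∨
              seq.getD (pvLcp s seq) default < s.getD (pvLcp s seq) default)) ∧
        pvLcp s seq + 1 ≤ l) := by
  induction s generalizing seq l with
  | nil =>
    cases seq with
    | nil =>
      have : l = 0 := by simpa using hl
      subst this
      simp [pvLcp]
    | cons b q =>
      cases l with
      | zero => simp [pvLcp]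
      | succ l' => simp [pvLcp, List.nil_lt_cons]
  | cons a s ih =>
    cases seq with
    | nil =>
      have : l = 0 := by simpa using hl
      subst this
      simp [pvLcp, List.not_lt_nil]
    | cons b q =>
      cases l with
      | zero => simp [pvLcp]
      | succ l' =>
        simp only [List.take_succ_cons, List.cons_lt_cons_iff]
        by_cases hab : a = b
        · subst hab
          have hl' : l' ≤ q.length := by simpa using hl
          rw [ih q l' hl']
          simp [pvLcp]
        · have hlt : pvLcp (a :: s) (b :: q) = 0 := by simp [pvLcp, hab]
          rw [hlt]
          simp only [List.length_cons, List.getD_cons_zero]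
          constructor
          · rintro (h | ⟨h1, h2⟩)
            · refine ⟨?_, by omega⟩
              rintro ⟨-, h3 | h3⟩
              · omega
              · exact absurd h (asymm h3)
            · exact absurd h1 hab
          · rintro ⟨h1, -⟩
            left
            rcases lt_trichotomy a b with h | h | h
            · exact h
            · exact absurd h hab
            · exact absurd ⟨by omega, Or.inr h⟩ h1

-- startswith characterisation: for l ≤ |seq|, seq[:l] is a prefix of s iff l ≤ lcp
theorem pvPrefix_take_iff (s seq : List Char) (l : Nat) (hl : l ≤ seq.length) :
    (seq.take l).isPrefixOf s = true ↔ l ≤ pvLcp s seq := by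
  rw [List.isPrefixOf_iff_prefix]
  induction s generalizing seq l with
  | nil =>
    cases seq with
    | nil => have : l = 0 := by simpa using hl
             subst this; simp [pvLcp]
    | cons b q =>
      cases l with
      | zero => simp
      | succ l' => simp [pvLcp]
  | cons a s ih =>
    cases seq with
    | nil => have : l = 0 := by simpa using hl
             subst this; simp
    | cons b q =>
      cases l with
      | zero => simp
      | succ l' =>
        simp only [List.take_succ_cons, List.cons_prefix_cons]
        by_cases hab : a = b
        · subst hab
          have hl' : l' ≤ q.length := by simpa using hl
          rw [ih q l' hl']
          simp [pvLcp]
        · simp [pvLcp, hab]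
          exact fun h => absurd h.symm hab

-- the batched descent computes exactly the individual binary searches
theorem pvSolveB_eq (a : List String) (seq : List Char) :
    ∀ (d ql qr lo hi : Nat), hi - lo ≤ d → hi ≤ a.length → qr ≤ seq.length + 1 →
      pvSolveB a seq ql qr lo hi =
        (List.range' ql (qr - ql)).map
          (fun l => pvBisect a (String.ofList (seq.take l)) lo hi) := by
  intro d
  induction d with
  | zero =>
    intro ql qr lo hi h1 _ _
    rw [pvSolveB]
    by_cases hq : ql ≥ qr
    · simp [hq, Nat.sub_eq_zero_of_le hq]
    · have hlh : lo ≥ hi := by omega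
      simp only [hq, if_false, hlh, if_true]
      symm
      refine List.eq_replicate_iff.mpr ⟨by simp, ?_⟩
      intro b hb
      simp only [List.mem_map, List.mem_range'] at hb
      obtain ⟨l, _, rfl⟩ := hb
      exact pvBisect_stop a _ lo hi (by omega)
  | succ d ih =>
    intro ql qr lo hi h1 h2 h3
    rw [pvSolveB]
    by_cases hq : ql ≥ qr
    · simp [hq, Nat.sub_eq_zero_of_le hq]
    by_cases hlh : lo ≥ hi
    · simp only [hq, if_false, hlh, if_true]
      symm
      refine List.eq_replicate_iff.mpr ⟨by simp, ?_⟩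
      intro b hb
      simp only [List.mem_map, List.mem_range'] at hb
      obtain ⟨l, _, rfl⟩ := hb
      exact pvBisect_stop a _ lo hi (by omega)
    simp only [hq, if_false, hlh]
    set mid := (lo + hi) / 2 with hmid
    set s := (a.getD mid "").toList with hs
    set c := pvLcp s seq with hc
    set B := (c < s.length ∧ (c = seq.length ∨ seq.getD c default < s.getD c default)) with hB
    set t := if B then qr else min qr (max ql (c + 1)) with ht
    have hmlo : lo ≤ mid := by omega
    have hmhi : mid < hi := by omega
    have hql : ql ≤ t ∧ t ≤ qr := by
      rcases ite_eq_iff.mp ht.symm with ⟨_, h⟩ | ⟨_, h⟩ <;> omega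
    -- the threshold property, phrased for the bisect comparison at this node
    have key : ∀ l : Nat, ql ≤ l → l < qr →
        ((a.getD mid "" < String.ofList (seq.take l)) ↔ t ≤ l) := by
      intro l hl1 hl2
      rw [String.lt_iff_toList_lt, String.toList_ofList, ← hs]
      rw [pvLt_take_iff s seq l (by omega)]
      rw [← hc, ← hB]
      by_cases hb : B
      · simp only [hb, not_true_eq_false, false_and, false_iff]
        rcases ite_eq_iff.mp ht.symm with ⟨_, h⟩ | ⟨h, _⟩
        · omega
        · exact absurd hb h
      · simp only [hb, not_false_eq_true, true_and]
        rcases ite_eq_iff.mp ht.symm with ⟨h, _⟩ | ⟨_, h⟩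
        · exact absurd h hb
        · omega
    have hsplit : List.range' ql (qr - ql) = List.range' ql (t - ql) ++ List.range' t (qr - t) := by
      have := @List.range'_append ql (t - ql) (qr - t) 1
      simp only [one_mul] at this
      rw [show ql + (t - ql) = t by omega] at this
      rw [show (t - ql) + (qr - t) = qr - ql by omega] at this
      exact this.symm
    rw [hsplit, List.map_append]
    congr 1
    · rw [ih ql t lo mid (by omega) (by omega) (by omega)]
      apply List.map_congr_left
      intro l hl
      simp only [List.mem_range'] at hl
      have h4 : l < t := by omega
      rw [pvBisect_step a _ lo hi (by omega), ← hmid,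
          if_neg (by rw [key l (by omega) (by omega)]; omega)]
    · rw [ih t qr (mid + 1) hi (by omega) (by omega) (by omega)]
      apply List.map_congr_left
      intro l hl
      simp only [List.mem_range'] at hl
      have h4 : t ≤ l := by omega
      rw [pvBisect_step a _ lo hi (by omega), ← hmid,
          if_pos (by rw [key l (by omega) (by omega)]; omega)]

-- sequence[:i+1] as a literal take
theorem pvSlice_eq (s : String) (i : Nat) :
    PySem.Str.slice s none (some ((i : Int) + 1)) = String.ofList (s.toList.take (i + 1)) := by
  have h : (PySem.Str.slice s none (some ((i : Int) + 1))).toList = s.toList.take (i + 1) := by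
    simp [PySem.Str.slice, PySem.List.slice_to _ (by omega : (0:Int) ≤ (i : Int) + 1)]
  exact String.toList_injective (by rw [h, String.toList_ofList])

-- A's loop equals B's final scan over the individually-bisected positions
theorem pvLoopA_eq (sequence : String) (a : List String) :
    ∀ (i : Nat) (score : Int), i ≤ sequence.toList.length →
      pvLoopA sequence a i score =
        score + pvScanB a sequence.toList a.length
          ((List.range' (i + 1) (sequence.toList.length - i)).map
            (fun l => pvBisect a (String.ofList (sequence.toList.take l)) 0 a.length))
          (i + 1) := by
  have main : ∀ (k i : Nat) (score : Int), i ≤ sequence.toList.length →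
      sequence.toList.length - i = k →
      pvLoopA sequence a i score =
        score + pvScanB a sequence.toList a.length
          ((List.range' (i + 1) (sequence.toList.length - i)).map
            (fun l => pvBisect a (String.ofList (sequence.toList.take l)) 0 a.length))
          (i + 1) := by
    intro k
    induction k with
    | zero =>
      intro i score hi hk
      rw [pvLoopA]
      rw [dif_neg (by omega), hk]
      simp [pvScanB]
    | succ k ih =>
      intro i score hi hk
      rw [pvLoopA, dif_pos (by omega)]
      simp only
      rw [pvSlice_eq sequence i, pvBisectLeft_eq]
      rw [hk, List.range'_succ, List.map_cons, pvScanB]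
      have hsw : PySem.Str.startswith
          (a.getD (pvBisect a (String.ofList (sequence.toList.take (i + 1))) 0 a.length) "")
          (String.ofList (sequence.toList.take (i + 1))) = true ↔
          (i + 1) ≤ pvLcp
            (a.getD (pvBisect a (String.ofList (sequence.toList.take (i + 1))) 0 a.length) "").toList
            sequence.toList := by
        rw [show ∀ (s p : String), PySem.Str.startswith s p = p.toList.isPrefixOf s.toList from
              fun s p => by simp [PySem.Str.startswith, PySem.Chars.startswith]]
        rw [String.toList_ofList]
        exact pvPrefix_take_iff _ _ _ (by omega)
      by_cases hc : pvBisect a (String.ofList (sequence.toList.take (i + 1))) 0 a.length < a.length ∧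
          (i + 1) ≤ pvLcp
            (a.getD (pvBisect a (String.ofList (sequence.toList.take (i + 1))) 0 a.length) "").toList
            sequence.toList
      · rw [if_pos ⟨hc.1, hsw.mpr hc.2⟩, if_pos hc]
        rw [ih (i + 1) (score + 1) (by omega) (by omega)]
        rw [show sequence.toList.length - (i + 1) = k by omega]
        ring
      · have : ¬ (pvBisect a (String.ofList (sequence.toList.take (i + 1))) 0 a.length < a.length ∧
            PySem.Str.startswith
              (a.getD (pvBisect a (String.ofList (sequence.toList.take (i + 1))) 0 a.length) "")
              (String.ofList (sequence.toList.take (i + 1))) = true) := by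
          intro h; exact hc ⟨h.1, hsw.mp h.2⟩
        rw [if_neg this, if_neg hc]
        ring
  intro i score hi
  exact main (sequence.toList.length - i) i score hi rfl

-- ===== VERDICT (by name: the statement is the Claim_ definition above) =====
theorem score_current_sequence_spec : Claim_equal_score_current_sequence := by
  intro sequence suffix_list _dom
  unfold Spec_score_current_sequence score_current_sequence score_current_sequence_alt
  show pvLoopA sequence suffix_list 0 0 =
    pvScanB suffix_list sequence.toList suffix_list.length
      (pvSolveB suffix_list sequence.toList 1 (sequence.toList.length + 1) 0 suffix_list.length) 1
  rw [pvLoopA_eq sequence suffix_list 0 0 (Nat.zero_le _),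
      pvSolveB_eq suffix_list sequence.toList suffix_list.length 1
        (sequence.toList.length + 1) 0 suffix_list.length (le_refl _) (le_refl _) (by omega)]
  norm_num
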